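-- pv_equiv track=rewrite | github.com/marycheff/ISRPO | main.py | check_same_sign
-- ===== SOURCE A (Python) =====
-- def check_same_sign(arr):
--     if len(arr) == 0:
--         return False
--     first_sign = -1
--     for x in arr:
--         if x == 0:
--             return False
--
--         if first_sign == -1:
--             first_sign = x > 0
--         elif (x > 0) != first_sign:
--             return False
--     return True
-- ===== SOURCE B (Python) =====
-- def check_same_sign(arr):
--     if len(arr) == 0:
--         return False
--     if any(x == 0 for x in arr):
--         return False
--     return len({x > 0 for x in arr}) == 1
-- ===== Notes on version B (the rewrite author's own statement) =====
-- stated objective: simpler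
-- what changed: Replaced A's single stateful early-exit loop with a sentinel first_sign variable by three declarative passes: empty check, any-zero check, and counting the distinct sign booleans with a set.
import Mathlib
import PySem

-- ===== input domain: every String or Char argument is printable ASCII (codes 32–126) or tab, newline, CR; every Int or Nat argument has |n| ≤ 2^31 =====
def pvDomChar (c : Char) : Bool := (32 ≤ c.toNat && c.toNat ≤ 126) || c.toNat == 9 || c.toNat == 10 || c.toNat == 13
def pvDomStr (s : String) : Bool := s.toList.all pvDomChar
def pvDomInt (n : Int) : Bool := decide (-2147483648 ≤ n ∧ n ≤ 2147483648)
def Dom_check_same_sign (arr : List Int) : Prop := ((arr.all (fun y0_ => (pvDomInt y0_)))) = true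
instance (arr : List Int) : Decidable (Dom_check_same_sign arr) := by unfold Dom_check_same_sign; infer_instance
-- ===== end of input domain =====

-- B replaces A's stateful early-exit loop (sentinel first_sign) by three declarative passes:
-- empty check, any-zero check, and counting the distinct sign booleans with a set (objective: simpler).

-- ===== PORT A =====
-- A's loop with early returns; first_sign starts as the sentinel -1 (never equal to a Python bool),
-- modelled exactly by Option Bool (none = -1, some b = the stored bool).
def csLoop : List Int → Option Bool → Bool
  | [], _ => true
  | x :: xs, fs =>
    if x = 0 then false
    else match fs with
      | none => csLoop xs (some (decide (0 < x)))
      | some b => if decide (0 < x) ≠ b then false else csLoop xs (some b)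

def check_same_sign (arr : List Int) : Bool :=
  if arr.length = 0 then false else csLoop arr none

-- ===== PORT B =====
def check_same_sign_alt (arr : List Int) : Bool :=
  if arr.length = 0 then false
  else if arr.any (fun x => decide (x = 0)) then false
  else decide ((PySem.Set.ofList (arr.map (fun x => decide (0 < x)))).length = 1)

-- ===== PRECONDITION & SPEC =====
def Spec_check_same_sign (arr : List Int) (out : Bool) : Prop := out = check_same_sign_alt arr
instance (arr : List Int) (out : Bool) : Decidable (Spec_check_same_sign arr out) := by unfold Spec_check_same_sign; infer_instance

-- ===== CLAIM (what is proved, stated in full; the proofs are below) =====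
def Claim_equal_check_same_sign : Prop := ∀ (arr : List Int), Dom_check_same_sign arr → Spec_check_same_sign arr (check_same_sign arr)

-- ===== LEMMAS AND PROOFS =====

-- A's loop after the first element: all remaining elements nonzero and of the recorded sign.
theorem csLoop_some (xs : List Int) (b : Bool) :
    csLoop xs (some b) = xs.all (fun x => !decide (x = 0) && (decide (0 < x) == b)) := by
  induction xs with
  | nil => rfl
  | cons x xs ih =>
    simp only [csLoop, List.all_cons]
    by_cases hx : x = 0
    · simp [hx]
    · by_cases hs : decide (0 < x) = b
      · simp [hx, hs, ih]
      · simp [hx, hs]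

theorem foldl_add_length_le {α : Type} [BEq α] (l : List α) (s : PySem.Set α) :
    s.length ≤ (l.foldl PySem.Set.add s).length := by
  induction l generalizing s with
  | nil => exact le_refl _
  | cons z l ih =>
    refine le_trans ?_ (ih (PySem.Set.add s z))
    simp only [PySem.Set.add]
    split
    · exact le_refl _
    · simp

-- the singleton-set characterisation: foldl add [y] l has length 1 iff every element is y
theorem foldl_add_singleton (l : List Bool) (y : Bool) :
    ((l.foldl PySem.Set.add [y]).length = 1) ↔ ∀ z ∈ l, z = y := by
  induction l with
  | nil => simp
  | cons z l ih =>
    by_cases hz : z = y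
    · subst hz
      simp only [List.foldl_cons, List.mem_cons]
      have : PySem.Set.add [z] z = [z] := by simp [PySem.Set.add, PySem.Set.contains]
      rw [this]
      rw [ih]
      constructor
      · intro h w hw
        rcases hw with h1 | h2
        · exact h1
        · exact h w h2
      · intro h w hw; exact h w (Or.inr hw)
    · have hadd : PySem.Set.add [y] z = [y, z] := by
        simp [PySem.Set.add, PySem.Set.contains]
        first
          | exact hz
          | exact fun h => hz h.symm
      constructor
      · intro h
        exfalso
        have := foldl_add_length_le l (PySem.Set.add [y] z)
        rw [hadd] at this
        simp only [List.foldl_cons, hadd] at h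
        simp only [List.length_cons, List.length_nil] at this
        omega
      · intro h
        exact absurd (h z (by simp)) hz

theorem ofList_map_length_one (a : Int) (rest : List Int) :
    ((PySem.Set.ofList ((a :: rest).map (fun x => decide (0 < x)))).length = 1) ↔
      ∀ x ∈ rest, decide (0 < x) = decide (0 < a) := by
  rw [PySem.Set.ofList_eq_foldl]
  simp only [List.map_cons, List.foldl_cons]
  have h0 : PySem.Set.add [] (decide (0 < a)) = [decide (0 < a)] := rfl
  rw [h0, foldl_add_singleton]
  simp

-- ===== VERDICT (by name: the statement is the Claim_ definition above) =====
theorem check_same_sign_spec : Claim_equal_check_same_sign := by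
  intro arr _
  unfold Spec_check_same_sign check_same_sign check_same_sign_alt
  cases arr with
  | nil => rfl
  | cons a rest =>
    simp only [List.length_cons, List.any_cons]
    by_cases ha : a = 0
    · simp [ha, csLoop]
    · by_cases hz : ∃ x ∈ rest, x = 0
      · -- a zero in rest: both sides false
        rcases hz with ⟨x0, hx0, hx00⟩
        have hA : csLoop (a :: rest) none = false := by
          simp only [csLoop, if_neg ha, csLoop_some]
          rw [List.all_eq_false]
          exact ⟨x0, hx0, by simp [hx00]⟩
        have hB : rest.any (fun x => decide (x = 0)) = true := by
          rw [List.any_eq_true]; exact ⟨x0, hx0, by simp [hx00]⟩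
        simp [hA, hB, ha]
      · push Not at hz
        have hB : rest.any (fun x => decide (x = 0)) = false := by
          rw [List.any_eq_false]; intro x hx; simp [hz x hx]
        have hA : csLoop (a :: rest) none =
            rest.all (fun x => !decide (x = 0) && (decide (0 < x) == decide (0 < a))) := by
          simp only [csLoop, if_neg ha, csLoop_some]
        simp only [if_neg (by simp : ¬ (rest.length + 1 = 0)), hA, hB, ha, decide_false,
          Bool.false_or, Bool.if_false_left, Bool.not_false, Bool.true_and]
        rw [Bool.eq_iff_iff]
        simp only [List.all_eq_true, Bool.and_eq_true, Bool.not_eq_true', decide_eq_true_eq,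
          decide_eq_false_iff_not, beq_iff_eq, Bool.false_eq_true, not_false_iff, true_and]
        rw [ofList_map_length_one]
        constructor
        · intro h x hx
          exact (h x hx).2
        · intro h x hx
          exact ⟨hz x hx, h x hx⟩
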